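-- pv_equiv track=rewrite | github.com/sultonmurodovu11-blip/telegram-bot | main.py | sort_codes_for_folder
-- ===== SOURCE A (Python) =====
-- def parse_numeric_code(value):
--     if not value or not value.isdigit():
--         return None
--     return int(value)
--
-- def sort_codes_for_folder(codes):
--     numeric = []
--     non_numeric = []
--     for code in codes:
--         parsed = parse_numeric_code(code)
--         if parsed is None:
--             non_numeric.append(code)
--         else:
--             numeric.append((parsed, code))
--     numeric.sort(key=lambda item: item[0])
--     non_numeric.sort()
--     return [item[1] for item in numeric] + non_numeric
-- ===== SOURCE B (Python) =====
-- def parse_numeric_code(value):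
--     if not value or not value.isdigit():
--         return None
--     return int(value)
--
-- def sort_codes_for_folder(codes):
--     def key(code):
--         parsed = parse_numeric_code(code)
--         return (1, code) if parsed is None else (0, parsed)
--     return sorted(codes, key=key)
-- ===== Notes on version B (the rewrite author's own statement) =====
-- stated objective: simpler
-- what changed: Replaced the partition-into-two-lists plus two separate sorts plus concatenation with a single stable sorted() call whose key tags numeric codes (0, parsed int) and non-numeric codes (1, code).
import Mathlib
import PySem

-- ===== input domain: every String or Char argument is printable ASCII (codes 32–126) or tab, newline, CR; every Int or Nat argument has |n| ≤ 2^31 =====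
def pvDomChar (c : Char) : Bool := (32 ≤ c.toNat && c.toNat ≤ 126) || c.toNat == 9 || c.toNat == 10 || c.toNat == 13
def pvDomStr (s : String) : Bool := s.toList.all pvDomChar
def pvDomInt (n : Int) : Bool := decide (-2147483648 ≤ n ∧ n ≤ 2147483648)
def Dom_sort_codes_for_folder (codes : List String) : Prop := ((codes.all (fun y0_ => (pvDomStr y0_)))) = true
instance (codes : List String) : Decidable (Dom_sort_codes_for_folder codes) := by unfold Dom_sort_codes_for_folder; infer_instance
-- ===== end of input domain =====

-- B replaces A's partition + two sorts + concatenation by ONE stable sort with a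
-- two-level key (numeric codes tagged before non-numeric ones); objective: simpler.


-- ===== PORT A =====
-- `int(value)` is ported as PySem.Int.ofStr?; on the ASCII domain a non-empty
-- all-digit string always parses, so the `none` branch is unreachable there.
def parse_numeric_code (value : String) : Option Int :=
  if value = "" || !(PySem.Str.strIsdigit value) then none
  else PySem.Int.ofStr? value

def sort_codes_for_folder (codes : List String) : List String :=
  let acc := codes.foldl
    (fun (acc : List (Int × String) × List String) code =>
      match parse_numeric_code code with
      | none => (acc.1, acc.2 ++ [code])
      | some parsed => (acc.1 ++ [(parsed, code)], acc.2))
    ([], [])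
  (PySem.List.sorted acc.1 (fun item => item.1) false).map (fun item => item.2)
    ++ PySem.List.sorted acc.2 (fun s => s) false

-- ===== PORT B =====
-- the Python key (0, parsed) / (1, code) is the lexicographic sum Lex (Int ⊕ String)
def sortCodesKey (code : String) : Lex (Int ⊕ String) :=
  match parse_numeric_code code with
  | none => toLex (Sum.inr code)
  | some parsed => toLex (Sum.inl parsed)

def sort_codes_for_folder_alt (codes : List String) : List String :=
  PySem.List.sorted codes sortCodesKey false

-- ===== PRECONDITION & SPEC =====
def Spec_sort_codes_for_folder (codes : List String) (out : List String) : Prop := out = sort_codes_for_folder_alt codes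
instance (codes : List String) (out : List String) : Decidable (Spec_sort_codes_for_folder codes out) := by unfold Spec_sort_codes_for_folder; infer_instance

-- ===== CLAIM (what is proved, stated in full; the proofs are below) =====
def Claim_equal_sort_codes_for_folder : Prop := ∀ (codes : List String), Dom_sort_codes_for_folder codes → Spec_sort_codes_for_folder codes (sort_codes_for_folder codes)

-- ===== LEMMAS AND PROOFS =====

def isNumCode (c : String) : Bool := (parse_numeric_code c).isSome

def pvVal (c : String) : Int := (parse_numeric_code c).getD 0

-- inserting an element that sorts before everything in R stays inside L
theorem insertBy_append_left {α : Type} (before : α → α → Bool) (x : α) (L R : List α)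
    (h : ∀ y ∈ R, before x y = true) :
    PySem.List.insertBy before x (L ++ R) = PySem.List.insertBy before x L ++ R := by
  induction L with
  | nil =>
    cases R with
    | nil => rfl
    | cons r rs => simp [PySem.List.insertBy, h r (by simp)]
  | cons hd tl ih =>
    simp only [List.cons_append, PySem.List.insertBy]
    by_cases hb : before x hd
    · simp [hb]
    · simp [hb, ih]

-- inserting an element that sorts after everything in L lands inside R
theorem insertBy_append_right {α : Type} (before : α → α → Bool) (x : α) (L R : List α)
    (h : ∀ y ∈ L, before x y = false) :
    PySem.List.insertBy before x (L ++ R) = L ++ PySem.List.insertBy before x R := by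
  induction L with
  | nil => rfl
  | cons hd tl ih =>
    have h0 := h hd (by simp)
    simp only [List.cons_append, PySem.List.insertBy, h0]
    simp [ih (fun y hy => h y (by simp [hy]))]

theorem insertBy_congr {α : Type} (b1 b2 : α → α → Bool) (x : α) (ys : List α)
    (h : ∀ y ∈ ys, b1 x y = b2 x y) :
    PySem.List.insertBy b1 x ys = PySem.List.insertBy b2 x ys := by
  induction ys with
  | nil => rfl
  | cons hd tl ih =>
    simp only [PySem.List.insertBy, h hd (by simp)]
    by_cases hb : b2 x hd
    · simp [hb]
    · simp [hb, ih (fun y hy => h y (by simp [hy]))]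

theorem insertBy_map {α β : Type} (b : α → α → Bool) (bf : β → β → Bool) (f : α → β)
    (x : α) (ys : List α) (h : ∀ a y : α, bf (f a) (f y) = b a y) :
    PySem.List.insertBy bf (f x) (ys.map f) = (PySem.List.insertBy b x ys).map f := by
  induction ys with
  | nil => rfl
  | cons hd tl ih =>
    simp only [List.map_cons, PySem.List.insertBy, h x hd]
    by_cases hb : b x hd
    · simp [hb]
    · simp [hb, ih]

-- folded insertion commutes with mapping when the comparison is transported by f
theorem foldl_insertBy_map {α β : Type} (b : α → α → Bool) (bf : β → β → Bool) (f : α → β)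
    (xs : List α) (h : ∀ a y : α, bf (f a) (f y) = b a y) :
    ∀ acc : List α,
      (xs.map f).foldl (fun a x => PySem.List.insertBy bf x a) (acc.map f) =
      (xs.foldl (fun a x => PySem.List.insertBy b x a) acc).map f := by
  induction xs with
  | nil => intro acc; rfl
  | cons hd tl ih =>
    intro acc
    simp only [List.map_cons, List.foldl_cons]
    rw [insertBy_map b bf f hd acc h, ih]

-- folded insertion only depends on the comparison on the inserted/accumulated elements
theorem foldl_insertBy_congr {α : Type} (b1 b2 : α → α → Bool) (xs : List α) :
    ∀ acc : List α,
      (∀ a, (a ∈ xs ∨ a ∈ acc) → ∀ y, (y ∈ xs ∨ y ∈ acc) → b1 a y = b2 a y) →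
      xs.foldl (fun a x => PySem.List.insertBy b1 x a) acc =
      xs.foldl (fun a x => PySem.List.insertBy b2 x a) acc := by
  induction xs with
  | nil => intro acc _; rfl
  | cons hd tl ih =>
    intro acc h
    simp only [List.foldl_cons]
    rw [insertBy_congr b1 b2 hd acc
      (fun y hy => h hd (Or.inl (by simp)) y (Or.inr hy))]
    apply ih
    intro a ha y hy
    apply h
    · rcases ha with ha | ha
      · exact Or.inl (by simp [ha])
      · rcases (PySem.List.mem_insertBy b2 hd a acc).mp ha with rfl | ha
        · exact Or.inl (by simp)
        · exact Or.inr ha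
    · rcases hy with hy | hy
      · exact Or.inl (by simp [hy])
      · rcases (PySem.List.mem_insertBy b2 hd y acc).mp hy with rfl | hy
        · exact Or.inl (by simp)
        · exact Or.inr hy

theorem sortCodesKey_num {c : String} (h : isNumCode c = true) :
    sortCodesKey c = toLex (Sum.inl (pvVal c)) := by
  unfold isNumCode at h
  unfold sortCodesKey pvVal
  cases hp : parse_numeric_code c with
  | none => simp [hp] at h
  | some p => simp

theorem sortCodesKey_non {c : String} (h : isNumCode c = false) :
    sortCodesKey c = toLex (Sum.inr c) := by
  unfold isNumCode at h
  unfold sortCodesKey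
  cases hp : parse_numeric_code c with
  | none => simp
  | some p => simp [hp] at h

-- B's single sort splits into the sort of the numeric part followed by the non-numeric part
theorem foldl_split (codes : List String) :
    ∀ (L R : List String), (∀ y ∈ L, isNumCode y = true) → (∀ y ∈ R, isNumCode y = false) →
      codes.foldl (fun a x => PySem.List.insertBy (fun a b => decide (sortCodesKey a < sortCodesKey b)) x a) (L ++ R) =
      (codes.filter isNumCode).foldl (fun a x => PySem.List.insertBy (fun a b => decide (sortCodesKey a < sortCodesKey b)) x a) L ++
      (codes.filter (fun c => !isNumCode c)).foldl (fun a x => PySem.List.insertBy (fun a b => decide (sortCodesKey a < sortCodesKey b)) x a) R := by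
  induction codes with
  | nil => intro L R _ _; rfl
  | cons hd tl ih =>
    intro L R hL hR
    by_cases hn : isNumCode hd
    · have hf1 : List.filter isNumCode (hd :: tl) = hd :: List.filter isNumCode tl := by
        simp [hn]
      have hf2 : List.filter (fun c => !isNumCode c) (hd :: tl) = List.filter (fun c => !isNumCode c) tl := by
        simp [hn]
      simp only [List.foldl_cons, hf1, hf2]
      rw [insertBy_append_left (fun a b => decide (sortCodesKey a < sortCodesKey b)) hd L R (by
        intro y hy
        show decide (sortCodesKey hd < sortCodesKey y) = true
        rw [sortCodesKey_num hn, sortCodesKey_non (hR y hy)]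
        simp)]
      exact ih _ R (by
        intro y hy
        rcases (PySem.List.mem_insertBy _ hd y L).mp hy with rfl | hy
        · exact hn
        · exact hL y hy) hR
    · have hn' : isNumCode hd = false := by simpa using hn
      have hf1 : List.filter isNumCode (hd :: tl) = List.filter isNumCode tl := by
        simp [hn']
      have hf2 : List.filter (fun c => !isNumCode c) (hd :: tl) = hd :: List.filter (fun c => !isNumCode c) tl := by
        simp [hn']
      simp only [List.foldl_cons, hf1, hf2]
      rw [insertBy_append_right (fun a b => decide (sortCodesKey a < sortCodesKey b)) hd L R (by
        intro y hy
        show decide (sortCodesKey hd < sortCodesKey y) = false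
        rw [sortCodesKey_non hn', sortCodesKey_num (hL y hy)]
        simp)]
      exact ih L _ hL (by
        intro y hy
        rcases (PySem.List.mem_insertBy _ hd y R).mp hy with rfl | hy
        · exact hn'
        · exact hR y hy)

-- A's accumulator after the loop: numeric pairs and non-numeric codes, each in input order
theorem foldl_acc (codes : List String) :
    ∀ (l1 : List (Int × String)) (l2 : List String),
      codes.foldl
        (fun (acc : List (Int × String) × List String) code =>
          match parse_numeric_code code with
          | none => (acc.1, acc.2 ++ [code])
          | some parsed => (acc.1 ++ [(parsed, code)], acc.2)) (l1, l2) =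
      (l1 ++ (codes.filter isNumCode).map (fun c => (pvVal c, c)),
       l2 ++ codes.filter (fun c => !isNumCode c)) := by
  induction codes with
  | nil => intro l1 l2; simp
  | cons hd tl ih =>
    intro l1 l2
    simp only [List.foldl_cons]
    cases hp : parse_numeric_code hd with
    | none =>
      have hn : isNumCode hd = false := by simp [isNumCode, hp]
      simp only [List.filter_cons, hn, Bool.not_false, ih]
      simp
    | some p =>
      have hn : isNumCode hd = true := by simp [isNumCode, hp]
      have hv : pvVal hd = p := by simp [pvVal, hp]
      simp only [List.filter_cons, hn, Bool.not_true, ih]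
      simp [hv]

-- ===== VERDICT (by name: the statement is the Claim_ definition above) =====
theorem sort_codes_for_folder_spec : Claim_equal_sort_codes_for_folder := by
  intro codes _
  unfold Spec_sort_codes_for_folder sort_codes_for_folder sort_codes_for_folder_alt
  set N := codes.filter isNumCode with hN
  set M := codes.filter (fun c => !isNumCode c) with hM
  have hmemN : ∀ y ∈ N, isNumCode y = true := by
    intro y hy; exact (List.mem_filter.mp hy).2
  have hmemM : ∀ y ∈ M, isNumCode y = false := by
    intro y hy; simpa using (List.mem_filter.mp hy).2
  rw [foldl_acc codes [] []]
  simp only [List.nil_append]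
  -- numeric side: sorted pairs by fst, then snd  =  sorted N by pvVal
  have hnum : (PySem.List.sorted (N.map (fun c => (pvVal c, c))) (fun item => item.1) false).map (fun item => item.2)
      = PySem.List.sorted N pvVal false := by
    rw [PySem.List.sorted_eq_foldl_insertBy, PySem.List.sorted_eq_foldl_insertBy]
    have hmap := foldl_insertBy_map (fun a b => decide (pvVal a < pvVal b))
      (fun (a b : Int × String) => decide (a.1 < b.1)) (fun c => (pvVal c, c)) N (by intro a y; simp) []
    simp only [List.map_nil] at hmap
    rw [hmap, List.map_map]
    have hid : ((fun (item : Int × String) => item.2) ∘ fun c => (pvVal c, c)) = id := rfl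
    rw [hid, List.map_id]
  -- numeric side key congruence
  have hnum2 : PySem.List.sorted N pvVal false = PySem.List.sorted N sortCodesKey false := by
    rw [PySem.List.sorted_eq_foldl_insertBy, PySem.List.sorted_eq_foldl_insertBy]
    apply foldl_insertBy_congr
    intro a ha y hy
    have ha' : a ∈ N := by simpa using ha
    have hy' : y ∈ N := by simpa using hy
    rw [sortCodesKey_num (hmemN a ha'), sortCodesKey_num (hmemN y hy')]
    simp
  -- non-numeric side key congruence
  have hnon : PySem.List.sorted M (fun s => s) false = PySem.List.sorted M sortCodesKey false := by
    rw [PySem.List.sorted_eq_foldl_insertBy, PySem.List.sorted_eq_foldl_insertBy]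
    apply foldl_insertBy_congr
    intro a ha y hy
    have ha' : a ∈ M := by simpa using ha
    have hy' : y ∈ M := by simpa using hy
    rw [sortCodesKey_non (hmemM a ha'), sortCodesKey_non (hmemM y hy')]
    simp
  rw [hnum, hnum2, hnon]
  rw [PySem.List.sorted_eq_foldl_insertBy codes sortCodesKey,
      PySem.List.sorted_eq_foldl_insertBy N sortCodesKey,
      PySem.List.sorted_eq_foldl_insertBy M sortCodesKey]
  exact (foldl_split codes [] [] (by simp) (by simp)).symm
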